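-- pv_equiv track=rewrite | github.com/SaiRameshkumar14/Python_tuto | work.py | find_elements_with_max_digit_presence
-- ===== SOURCE A (Python) =====
-- def find_elements_with_max_digit_presence(n, arr, d):
--     d = str(d)
--     max_count = 0
--     result = []
--
--     # Convert all elements to strings to handle leading zeros
--     str_arr = []
--     for num in arr:
--         str_arr.append(str(num))
--
--     # Find the maximum count of digit d in any element
--     for num in str_arr:
--         count = num.count(d)
--         if count > max_count:
--             max_count = count
--
--     # Collect elements with the maximum count of digit d
--     for num in str_arr:
--         if num.count(d) == max_count:
--             result.append(num)
--
--     return result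
-- ===== SOURCE B (Python) =====
-- def find_elements_with_max_digit_presence(n, arr, d):
--     # One pass: keep the best count so far and the elements achieving it.
--     d = str(d)
--     max_count = 0
--     result = []
--     for num in arr:
--         s = str(num)
--         c = s.count(d)
--         if c > max_count:
--             max_count = c
--             result = [s]
--         elif c == max_count:
--             result.append(s)
--     return result
-- ===== Notes on version B (the rewrite author's own statement) =====
-- stated objective: simpler
-- what changed: Replaces A's three passes (stringify list, scan for max count, rescan to collect) with a single pass that maintains the running maximum and the list of elements achieving it, resetting the list when a larger count appears.
import Mathlib
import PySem

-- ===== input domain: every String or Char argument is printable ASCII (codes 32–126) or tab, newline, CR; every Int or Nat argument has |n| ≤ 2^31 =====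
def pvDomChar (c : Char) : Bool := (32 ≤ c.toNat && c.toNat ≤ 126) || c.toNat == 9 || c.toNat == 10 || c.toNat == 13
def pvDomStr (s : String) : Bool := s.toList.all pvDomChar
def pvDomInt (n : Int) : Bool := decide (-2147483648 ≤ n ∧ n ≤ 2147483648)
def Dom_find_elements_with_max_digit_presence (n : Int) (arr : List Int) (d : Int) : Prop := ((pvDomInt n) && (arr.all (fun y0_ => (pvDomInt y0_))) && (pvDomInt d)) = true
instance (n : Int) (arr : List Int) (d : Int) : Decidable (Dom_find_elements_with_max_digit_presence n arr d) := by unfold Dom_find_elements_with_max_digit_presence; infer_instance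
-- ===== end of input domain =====

-- B replaces A's three passes (stringify, find max count, rescan to collect) by one pass
-- keeping the running maximum and the collected elements; objective: simpler.


-- ===== PORT A =====
def find_elements_with_max_digit_presence (n : Int) (arr : List Int) (d : Int) : List String :=
  let dS := PySem.Int.toStr d
  -- str_arr = [str(num) for num in arr] built by an append loop, as in A
  let str_arr : List String := arr.foldl (fun acc num => acc ++ [PySem.Int.toStr num]) []
  -- first scan: maximum count of digit d
  let max_count : Int :=
    str_arr.foldl (fun mc num =>
      let count : Int := (PySem.Str.count num dS : Int)
      if count > mc then count else mc) 0
  -- second scan: collect elements whose count equals max_count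
  str_arr.foldl (fun res num =>
    if (PySem.Str.count num dS : Int) = max_count then res ++ [num] else res) []

-- ===== PORT B =====
def find_elements_with_max_digit_presence_alt (n : Int) (arr : List Int) (d : Int) : List String :=
  let dS := PySem.Int.toStr d
  (arr.foldl (fun (st : Int × List String) num =>
      let s := PySem.Int.toStr num
      let c : Int := (PySem.Str.count s dS : Int)
      if c > st.1 then (c, [s])
      else if c = st.1 then (st.1, st.2 ++ [s])
      else st) ((0 : Int), ([] : List String))).2

-- ===== PRECONDITION & SPEC =====
def Spec_find_elements_with_max_digit_presence (n : Int) (arr : List Int) (d : Int) (out : List String) : Prop := out = find_elements_with_max_digit_presence_alt n arr d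
instance (n : Int) (arr : List Int) (d : Int) (out : List String) : Decidable (Spec_find_elements_with_max_digit_presence n arr d out) := by unfold Spec_find_elements_with_max_digit_presence; infer_instance

-- ===== CLAIM (what is proved, stated in full; the proofs are below) =====
def Claim_equal_find_elements_with_max_digit_presence : Prop := ∀ (n : Int) (arr : List Int) (d : Int), Dom_find_elements_with_max_digit_presence n arr d → Spec_find_elements_with_max_digit_presence n arr d (find_elements_with_max_digit_presence n arr d)

-- ===== LEMMAS AND PROOFS =====

-- the running-maximum fold of A, parametrized by the count function
def pvMaxFold (c : String → Int) (xs : List String) (m : Int) : Int :=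
  xs.foldl (fun mc s => if c s > mc then c s else mc) m

theorem pvMaxFold_le (c : String → Int) (xs : List String) (m : Int) :
    m ≤ pvMaxFold c xs m := by
  induction xs generalizing m with
  | nil => simp [pvMaxFold]
  | cons x xs ih =>
    simp only [pvMaxFold, List.foldl_cons]
    split
    · exact le_trans (le_of_lt (by assumption)) (ih _)
    · exact ih m

-- invariant of B's single pass, stated over the stringified list
theorem pvB_fold_inv (c : String → Int) (xs : List String) (m : Int) (r : List String) :
    xs.foldl (fun (st : Int × List String) s =>
        if c s > st.1 then (c s, [s])
        else if c s = st.1 then (st.1, st.2 ++ [s])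
        else st) (m, r)
      = (pvMaxFold c xs m,
         (if pvMaxFold c xs m = m then r else []) ++ xs.filter (fun s => c s = pvMaxFold c xs m)) := by
  induction xs generalizing m r with
  | nil => simp [pvMaxFold]
  | cons x xs ih =>
    have hM : ∀ m', pvMaxFold c (x :: xs) m' = pvMaxFold c xs (if c x > m' then c x else m') := by
      intro m'; simp [pvMaxFold]
    by_cases h1 : c x > m
    · -- reset
      have hx : c x ≤ pvMaxFold c xs (c x) := pvMaxFold_le c xs (c x)
      have hMm : pvMaxFold c (x :: xs) m ≠ m := by
        rw [hM]; simp only [if_pos h1]; omega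
      simp only [List.foldl_cons, if_pos h1, ih, hM, List.filter_cons]
      have h5 : pvMaxFold c xs (c x) ≠ m := by omega
      rcases lt_or_eq_of_le hx with hlt | heq
      · have h6 : ¬ (c x = pvMaxFold c xs (c x)) := by omega
        have h7 : ¬ (pvMaxFold c xs (c x) = c x) := by omega
        simp [h6, h5, h7]
      · have h6 : ¬ (c x = m) := by omega
        simp [← heq, h6]
    · -- no reset: max part is unchanged
      have hle : m ≤ pvMaxFold c xs m := pvMaxFold_le c xs m
      by_cases h2 : c x = m
      · -- append
        simp only [List.foldl_cons, if_neg h1, if_pos h2, ih, hM, List.filter_cons]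
        by_cases h3 : pvMaxFold c xs m = m
        · have : (c x = pvMaxFold c xs m) := by omega
          simp [h3, this]
        · have : ¬ (c x = pvMaxFold c xs m) := by omega
          simp [h3, this]
      · -- skip
        have h4 : ¬ (c x = pvMaxFold c xs m) := by
          by_cases h3 : pvMaxFold c xs m = m
          · omega
          · intro he; omega
        simp only [List.foldl_cons, if_neg h1, if_neg h2, ih, hM, List.filter_cons]
        simp [h4]

-- ===== VERDICT (by name: the statement is the Claim_ definition above) =====
theorem find_elements_with_max_digit_presence_spec : Claim_equal_find_elements_with_max_digit_presence := by
  intro nn arr d _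
  show _ = _
  unfold find_elements_with_max_digit_presence find_elements_with_max_digit_presence_alt
  dsimp only
  set dS := PySem.Int.toStr d with hdS
  set c : String → Int := fun s => (PySem.Str.count s dS : Int) with hc
  -- A's string-building loop is a map
  rw [PySem.List.foldl_append_singleton_eq_map]
  -- A's collecting loop is a filter
  rw [PySem.List.foldl_append_ite_eq_filter]
  -- B's loop over ints is the same loop over the mapped strings
  rw [show (fun (st : Int × List String) num =>
        let s := PySem.Int.toStr num
        let ci : Int := (PySem.Str.count s dS : Int)
        if ci > st.1 then (ci, [s])
        else if ci = st.1 then (st.1, st.2 ++ [s])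
        else st)
      = (fun st num => (fun (st : Int × List String) s =>
          if c s > st.1 then (c s, [s])
          else if c s = st.1 then (st.1, st.2 ++ [s])
          else st) st (PySem.Int.toStr num)) from rfl]
  have hB := (List.foldl_map (f := PySem.Int.toStr)
      (g := fun (st : Int × List String) s =>
        if c s > st.1 then (c s, [s]) else if c s = st.1 then (st.1, st.2 ++ [s]) else st)
      (l := arr) (init := ((0 : Int), ([] : List String)))).symm
  rw [hB]
  rw [pvB_fold_inv c (arr.map PySem.Int.toStr) 0 []]
  simp [pvMaxFold, c]
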